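-- pv_equiv track=rewrite | github.com/esaul314/chunkify | pdf_chunker/passes/emit_jsonl.py | _partition_preamble
-- ===== SOURCE A (Python) =====
-- def _partition_preamble(lines: list[str]) -> tuple[list[str], list[str]]:
--     if not lines:
--         return [], []
--
--     idx = len(lines)
--     while idx > 0 and lines[idx - 1].strip():
--         idx -= 1
--     while idx > 0 and not lines[idx - 1].strip():
--         idx -= 1
--
--     if idx == 0:
--         return lines, []
--     return lines[:idx], lines[idx:]
-- ===== SOURCE B (Python) =====
-- def _partition_preamble(lines: list[str]) -> tuple[list[str], list[str]]:
--     # Single forward pass: flush the buffer into the committed preamble at every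
--     # non-blank -> blank transition; the final buffer is the trailing block.
--     committed, buffer, prev_nonblank = [], [], False
--     for line in lines:
--         nonblank = bool(line.strip())
--         if prev_nonblank and not nonblank:
--             committed += buffer
--             buffer = [line]
--         else:
--             buffer.append(line)
--         prev_nonblank = nonblank
--     return (committed, buffer) if committed else (lines, [])
-- ===== Notes on version B (the rewrite author's own statement) =====
-- stated objective: alternative
-- what changed: A finds the split point by scanning backwards with two while loops (trailing non-blank run, then the blank run before it) and slices; B makes one forward pass that flushes a buffer into the committed preamble at each non-blank-to-blank transition, the final buffer being the trailing block.
import Mathlib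
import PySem

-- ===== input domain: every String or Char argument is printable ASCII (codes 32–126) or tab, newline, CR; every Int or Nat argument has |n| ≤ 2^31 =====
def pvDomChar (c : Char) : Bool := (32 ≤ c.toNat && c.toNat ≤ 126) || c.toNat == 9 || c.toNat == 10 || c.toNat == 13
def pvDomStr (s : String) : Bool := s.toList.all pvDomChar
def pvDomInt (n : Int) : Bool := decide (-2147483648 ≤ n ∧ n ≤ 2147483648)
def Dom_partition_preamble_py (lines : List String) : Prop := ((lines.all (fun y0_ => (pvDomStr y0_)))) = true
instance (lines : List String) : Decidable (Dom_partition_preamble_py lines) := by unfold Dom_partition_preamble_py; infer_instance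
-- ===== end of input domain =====

-- B replaces A's two backward slicing loops by one forward pass that flushes a buffer
-- into the preamble at every non-blank -> blank transition (objective: alternative).

-- Python's truthiness test `bool(line.strip())`, shared primitive of both sources
def pvNonblank (line : String) : Bool := PySem.Str.strip line != ""

-- ===== PORT A =====
-- first while loop: strip the trailing non-blank run
def pvLoopA1 (lines : List String) : Nat → Nat
  | 0 => 0
  | n + 1 => if pvNonblank (lines.getD n "") then pvLoopA1 lines n else n + 1

-- second while loop: strip the blank run before it
def pvLoopA2 (lines : List String) : Nat → Nat
  | 0 => 0
  | n + 1 => if !pvNonblank (lines.getD n "") then pvLoopA2 lines n else n + 1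

def partition_preamble_py (lines : List String) : List String × List String :=
  if lines = [] then ([], [])
  else
    let idx := pvLoopA2 lines (pvLoopA1 lines lines.length)
    if idx = 0 then (lines, [])
    else (PySem.List.slice lines none (some (idx : Int)),
          PySem.List.slice lines (some (idx : Int)) none)

-- ===== PORT B =====
-- loop body: state = (committed, buffer, prev_nonblank)
def pvStepB (st : List String × List String × Bool) (line : String) :
    List String × List String × Bool :=
  let nonblank := pvNonblank line
  if st.2.2 && !nonblank then (st.1 ++ st.2.1, [line], nonblank)
  else (st.1, st.2.1 ++ [line], nonblank)

def partition_preamble_py_alt (lines : List String) : List String × List String :=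
  let s := lines.foldl pvStepB ([], [], false)
  if s.1 ≠ [] then (s.1, s.2.1) else (lines, [])

-- ===== PRECONDITION & SPEC =====
def Spec_partition_preamble_py (lines : List String) (out : List String × List String) : Prop := out = partition_preamble_py_alt lines
instance (lines : List String) (out : List String × List String) : Decidable (Spec_partition_preamble_py lines out) := by unfold Spec_partition_preamble_py; infer_instance

-- ===== CLAIM (what is proved, stated in full; the proofs are below) =====
def Claim_equal_partition_preamble_py : Prop := ∀ (lines : List String), Dom_partition_preamble_py lines → Spec_partition_preamble_py lines (partition_preamble_py lines)

-- ===== LEMMAS AND PROOFS =====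

def pvIdxA (xs : List String) : Nat := pvLoopA2 xs (pvLoopA1 xs xs.length)

def pvLastNB (xs : List String) : Bool := (xs.getLast?.map pvNonblank).getD false

theorem pvLoopA1_le (xs : List String) (n : Nat) : pvLoopA1 xs n ≤ n := by
  induction n with
  | zero => simp [pvLoopA1]
  | succ m ih => rw [pvLoopA1]; split <;> omega

theorem pvLoopA2_le (xs : List String) (n : Nat) : pvLoopA2 xs n ≤ n := by
  induction n with
  | zero => simp [pvLoopA2]
  | succ m ih => rw [pvLoopA2]; split <;> omega

theorem pvIdxA_le (xs : List String) : pvIdxA xs ≤ xs.length :=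
  le_trans (pvLoopA2_le _ _) (pvLoopA1_le _ _)

theorem pvLoopA1_append (xs : List String) (x : String) (n : Nat) (h : n ≤ xs.length) :
    pvLoopA1 (xs ++ [x]) n = pvLoopA1 xs n := by
  induction n with
  | zero => rfl
  | succ m ih =>
    have hm : m < xs.length := h
    have hg : (xs ++ [x]).getD m "" = xs.getD m "" := by
      simp [List.getD, List.getElem?_append_left hm]
    rw [pvLoopA1, pvLoopA1, hg, ih (by omega)]

theorem pvLoopA2_append (xs : List String) (x : String) (n : Nat) (h : n ≤ xs.length) :
    pvLoopA2 (xs ++ [x]) n = pvLoopA2 xs n := by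
  induction n with
  | zero => rfl
  | succ m ih =>
    have hm : m < xs.length := h
    have hg : (xs ++ [x]).getD m "" = xs.getD m "" := by
      simp [List.getD, List.getElem?_append_left hm]
    rw [pvLoopA2, pvLoopA2, hg, ih (by omega)]

theorem pvGetD_last (xs : List String) (x : String) :
    (xs ++ [x]).getD xs.length "" = x := by
  simp [List.getD]

-- getD at the last position of a nonempty list is its last element
theorem pvGetD_getLast (xs : List String) (hne : xs ≠ []) :
    xs.getD (xs.length - 1) "" = xs.getLast hne := by
  have hlt : xs.length - 1 < xs.length := by
    have := List.length_pos_iff.mpr hne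
    omega
  simp [List.getD, List.getElem?_eq_getElem hlt, List.getLast_eq_getElem]

theorem pvIdxA_append_nonblank (xs : List String) (x : String) (hx : pvNonblank x = true) :
    pvIdxA (xs ++ [x]) = pvIdxA xs := by
  unfold pvIdxA
  have h1 : pvLoopA1 (xs ++ [x]) (xs ++ [x]).length = pvLoopA1 xs xs.length := by
    rw [List.length_append, List.length_singleton]
    rw [show xs.length + 1 = xs.length + 1 from rfl]
    rw [pvLoopA1, pvGetD_last, hx]
    simpa using pvLoopA1_append xs x xs.length le_rfl
  rw [h1]
  exact pvLoopA2_append xs x _ (pvLoopA1_le _ _)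

theorem pvIdxA_append_blank_true (xs : List String) (x : String)
    (hx : pvNonblank x = false) (hl : pvLastNB xs = true) :
    pvIdxA (xs ++ [x]) = xs.length := by
  have hne : xs ≠ [] := by
    intro h; subst h; simp [pvLastNB] at hl
  unfold pvIdxA
  have h1 : pvLoopA1 (xs ++ [x]) (xs ++ [x]).length = xs.length + 1 := by
    rw [List.length_append, List.length_singleton, pvLoopA1, pvGetD_last, hx]
    simp
  rw [h1, pvLoopA2, pvGetD_last, hx]
  simp only [Bool.not_false]
  rw [pvLoopA2_append xs x xs.length le_rfl]
  -- pvLoopA2 xs xs.length = xs.length since the last element is nonblank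
  obtain ⟨m, hm⟩ : ∃ m, xs.length = m + 1 := by
    cases xs with
    | nil => exact absurd rfl hne
    | cons a l => exact ⟨l.length, by simp⟩
  have hlast : pvNonblank (xs.getD m "") = true := by
    have h := pvGetD_getLast xs hne
    rw [hm, Nat.add_sub_cancel] at h
    rw [h]
    simpa [pvLastNB, List.getLast?_eq_some_getLast hne] using hl
  rw [hm, pvLoopA2, hlast]
  simp

theorem pvIdxA_append_blank_false (xs : List String) (x : String)
    (hx : pvNonblank x = false) (hl : pvLastNB xs = false) :
    pvIdxA (xs ++ [x]) = pvIdxA xs := by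
  unfold pvIdxA
  have h1 : pvLoopA1 (xs ++ [x]) (xs ++ [x]).length = xs.length + 1 := by
    rw [List.length_append, List.length_singleton, pvLoopA1, pvGetD_last, hx]
    simp
  rw [h1, pvLoopA2, pvGetD_last, hx]
  simp only [Bool.not_false]
  rw [pvLoopA2_append xs x xs.length le_rfl]
  -- RHS: pvLoopA1 xs xs.length = xs.length since xs is empty or ends blank
  cases xs with
  | nil => rfl
  | cons a l =>
    have hne : (a :: l) ≠ [] := by simp
    have hlast : pvNonblank ((a :: l).getD l.length "") = false := by
      have h := pvGetD_getLast (a :: l) hne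
      have h2 : (a :: l).length - 1 = l.length := by simp
      rw [h2] at h
      rw [h]
      simpa [pvLastNB, List.getLast?_eq_some_getLast hne] using hl
    have h3 : pvLoopA1 (a :: l) (a :: l).length = (a :: l).length := by
      rw [show (a :: l).length = l.length + 1 by simp, pvLoopA1, hlast]
      simp
    rw [h3, show (a :: l).length = l.length + 1 by simp, pvLoopA2, hlast]
    simp

-- the main invariant of B's single forward pass
theorem pvFoldB_inv (xs : List String) :
    xs.foldl pvStepB ([], [], false) =
      (xs.take (pvIdxA xs), xs.drop (pvIdxA xs), pvLastNB xs) := by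
  induction xs using List.reverseRecOn with
  | nil => rfl
  | append_singleton xs x ih =>
    rw [List.foldl_append, List.foldl_cons, List.foldl_nil, ih]
    have hle := pvIdxA_le xs
    by_cases hx : pvNonblank x = true
    · have hidx := pvIdxA_append_nonblank xs x hx
      simp only [pvStepB, hx, Bool.not_true, Bool.and_false, Bool.false_eq_true,
        if_false, hidx, List.take_append_of_le_length hle,
        List.drop_append_of_le_length hle]
      simp [pvLastNB, hx]
    · have hx' : pvNonblank x = false := by simpa using hx
      by_cases hl : pvLastNB xs = true
      · have hidx := pvIdxA_append_blank_true xs x hx' hl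
        simp only [pvStepB, hx', hl, Bool.not_false, Bool.and_true, if_true, hidx,
          List.take_append_drop, List.take_left, List.drop_left]
        simp [pvLastNB, hx']
      · have hl' : pvLastNB xs = false := by simpa using hl
        have hidx := pvIdxA_append_blank_false xs x hx' hl'
        simp only [pvStepB, hx', hl', Bool.false_and, Bool.false_eq_true,
          if_false, hidx, List.take_append_of_le_length hle,
          List.drop_append_of_le_length hle]
        simp [pvLastNB, hx']

-- ===== VERDICT (by name: the statement is the Claim_ definition above) =====
theorem partition_preamble_py_spec : Claim_equal_partition_preamble_py := by
  intro lines _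
  unfold Spec_partition_preamble_py
  simp only [partition_preamble_py, partition_preamble_py_alt, pvFoldB_inv]
  by_cases hnil : lines = []
  · subst hnil; simp
  · rw [if_neg hnil]
    by_cases h0 : pvIdxA lines = 0
    · rw [show pvLoopA2 lines (pvLoopA1 lines lines.length) = pvIdxA lines from rfl,
        if_pos h0, h0]
      simp
    · rw [show pvLoopA2 lines (pvLoopA1 lines lines.length) = pvIdxA lines from rfl,
        if_neg h0]
      have hne : lines.take (pvIdxA lines) ≠ [] := by
        rw [Ne, List.take_eq_nil_iff]
        rintro (h | h)
        exacts [h0 h, hnil h]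
      rw [if_pos hne, PySem.List.slice_to_natCast, PySem.List.slice_from_natCast]
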